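-- pv_equiv track=rewrite | github.com/ramonfragoso/tst_assignments | unidade9/toppl/toppl.py | filtra_alunos
-- ===== SOURCE A (Python) =====
-- def verifica_matricula(aluno, inscritos):
-- 	inscrito = False
-- 	i = 0
-- 	while i < len(inscritos) :
-- 		if aluno == inscritos[i]:
-- 			inscrito = True
-- 			return inscrito
-- 		else:
-- 			i += 1
-- 	return inscrito
--
-- def filtra_alunos(alunos, inscritos, nota):
-- 	indices = []
-- 	eliminados = 0
--
-- 	for i in range(len(alunos)):
-- 		if (alunos[i][1] < nota) or not verifica_matricula(alunos[i][0], inscritos):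
-- 			indices.append(i)
-- 			eliminados += 1
--
-- 	for i in range(len(indices)-1, -1, -1):
-- 		alunos.pop(indices[i])
--
-- 	return eliminados
-- ===== SOURCE B (Python) =====
-- def filtra_alunos(alunos, inscritos, nota):
--     mantidos = [a for a in alunos if a[1] >= nota and a[0] in inscritos]
--     eliminados = len(alunos) - len(mantidos)
--     alunos[:] = mantidos
--     return eliminados
-- ===== Notes on version B (the rewrite author's own statement) =====
-- stated objective: simpler
-- what changed: A collects the indices of failing entries and then pops them in a reverse second pass; B builds the survivor list in one filtering pass, slice-assigns it back, and returns the removed count as len(alunos) - len(mantidos).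
import Mathlib
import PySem

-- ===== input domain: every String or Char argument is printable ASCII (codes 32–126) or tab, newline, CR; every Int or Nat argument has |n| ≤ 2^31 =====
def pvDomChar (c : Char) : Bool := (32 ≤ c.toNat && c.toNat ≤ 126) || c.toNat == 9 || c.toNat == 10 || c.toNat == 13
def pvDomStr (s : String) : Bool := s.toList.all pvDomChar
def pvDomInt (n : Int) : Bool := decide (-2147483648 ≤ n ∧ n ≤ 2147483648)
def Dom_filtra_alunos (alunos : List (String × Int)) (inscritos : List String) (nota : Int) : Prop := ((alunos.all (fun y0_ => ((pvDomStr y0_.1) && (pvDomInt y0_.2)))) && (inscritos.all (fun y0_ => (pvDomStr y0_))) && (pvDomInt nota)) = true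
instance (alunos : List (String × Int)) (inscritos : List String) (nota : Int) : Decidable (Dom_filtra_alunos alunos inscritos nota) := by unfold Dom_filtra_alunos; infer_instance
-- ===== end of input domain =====

-- B replaces A's collect-failing-indices-then-pop-in-reverse two-pass scheme with one filter pass
-- and a count-by-difference (simpler). Both Pythons mutate `alunos` identically (B via alunos[:] =);
-- the equivalence proved here is about the RETURN value (the removed count) only.

-- ===== PORT A =====
-- the while loop of verifica_matricula (index i over inscritos)
def pvVerificaLoop (aluno : String) (inscritos : List String) (i : Nat) : Bool :=
  if h : i < inscritos.length then
    if aluno == inscritos[i] then true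
    else pvVerificaLoop aluno inscritos (i + 1)
  else false
termination_by inscritos.length - i

def verifica_matricula (aluno : String) (inscritos : List String) : Bool :=
  pvVerificaLoop aluno inscritos 0

-- A's second loop only mutates `alunos` in place (pops the collected indices in reverse); it never
-- touches the returned `eliminados`, and mutation is not modeled here, so it is omitted from the port.
def filtra_alunos (alunos : List (String × Int)) (inscritos : List String) (nota : Int) : Int :=
  let st := (PySem.List.pyRange 0 (PySem.List.len alunos) 1).foldl
    (fun (st : List Int × Int) i =>
      let a := PySem.List.pyGetD alunos i ("", 0)
      if a.2 < nota || !(verifica_matricula a.1 inscritos) then (st.1 ++ [i], st.2 + 1) else st)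
    ([], 0)
  st.2

-- ===== PORT B =====
def filtra_alunos_alt (alunos : List (String × Int)) (inscritos : List String) (nota : Int) : Int :=
  let mantidos := alunos.filter (fun a => decide (nota ≤ a.2) && inscritos.contains a.1)
  (alunos.length : Int) - (mantidos.length : Int)

-- ===== PRECONDITION & SPEC =====
def Spec_filtra_alunos (alunos : List (String × Int)) (inscritos : List String) (nota : Int) (out : Int) : Prop := out = filtra_alunos_alt alunos inscritos nota
instance (alunos : List (String × Int)) (inscritos : List String) (nota : Int) (out : Int) : Decidable (Spec_filtra_alunos alunos inscritos nota out) := by unfold Spec_filtra_alunos; infer_instance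

-- ===== CLAIM (what is proved, stated in full; the proofs are below) =====
def Claim_equal_filtra_alunos : Prop := ∀ (alunos : List (String × Int)) (inscritos : List String) (nota : Int), Dom_filtra_alunos alunos inscritos nota → Spec_filtra_alunos alunos inscritos nota (filtra_alunos alunos inscritos nota)

-- ===== LEMMAS AND PROOFS =====

-- the while loop of verifica_matricula is membership in the remaining suffix
theorem pvVerificaLoop_eq_contains (aluno : String) (inscritos : List String) (i : Nat) :
    pvVerificaLoop aluno inscritos i = (inscritos.drop i).contains aluno := by
  induction i using (pvVerificaLoop.induct aluno inscritos) with
  | case1 i h heq =>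
    rw [pvVerificaLoop, dif_pos h, if_pos heq]
    rw [List.drop_eq_getElem_cons h, List.contains_cons, heq, Bool.true_or]
  | case2 i h hne ih =>
    rw [pvVerificaLoop, dif_pos h, if_neg hne, ih]
    rw [List.drop_eq_getElem_cons h, List.contains_cons,
      Bool.eq_false_iff.mpr hne, Bool.false_or]
  | case3 i h =>
    rw [pvVerificaLoop, dif_neg h, List.drop_eq_nil_of_le (by omega)]
    simp

theorem verifica_eq_contains (aluno : String) (inscritos : List String) :
    verifica_matricula aluno inscritos = inscritos.contains aluno := by
  simpa using pvVerificaLoop_eq_contains aluno inscritos 0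

-- the eliminados component of A's fold is a countP (the appended index is irrelevant to .2)
theorem pvFold_snd_countP (r : List Int) (c : Int → Bool) (st : List Int × Int) :
    (r.foldl (fun (st : List Int × Int) i => if c i then (st.1 ++ [i], st.2 + 1) else st) st).2
    = st.2 + (r.countP c : Int) := by
  induction r generalizing st with
  | nil => simp
  | cons i t ih =>
    simp only [List.foldl_cons, List.countP_cons]
    by_cases h : c i = true
    · rw [if_pos h, ih]; simp [h]; omega
    · rw [if_neg h, ih]; simp [h]

-- counting over the index range with pyGetD is counting over the list itself
theorem pvCountP_pyRange_pyGetD {α : Type} [Inhabited α] (xs : List α) (d : α) (p : α → Bool) :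
    (PySem.List.pyRange 0 (PySem.List.len xs) 1).countP
      (fun i => p (PySem.List.pyGetD xs i d)) = xs.countP p := by
  have hmap := PySem.List.map_pyGetD_pyRange_zero xs d
  calc (PySem.List.pyRange 0 (PySem.List.len xs) 1).countP (fun i => p (PySem.List.pyGetD xs i d))
      = ((PySem.List.pyRange 0 (PySem.List.len xs) 1).map
          (fun i => PySem.List.pyGetD xs i d)).countP p := by
        rw [List.countP_map]
        simp only [Function.comp_def]
    _ = xs.countP p := by rw [hmap]

-- removed = complement of kept: count of removed + length of survivors = length
theorem pvCountP_not_add_filter {α : Type} (q : α → Bool) (t : List α) :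
    t.countP (fun a => !q a) + (t.filter q).length = t.length := by
  induction t with
  | nil => simp
  | cons a t ih =>
    rw [List.countP_cons, List.filter_cons]
    by_cases h : q a = true
    · rw [if_pos h]; simp [h]; omega
    · rw [if_neg h]; simp [h]; omega

-- ===== VERDICT (by name: the statement is the Claim_ definition above) =====
theorem filtra_alunos_spec : Claim_equal_filtra_alunos := by
  intro alunos inscritos nota _
  unfold Spec_filtra_alunos filtra_alunos filtra_alunos_alt
  simp only []
  rw [pvFold_snd_countP _ (fun i =>
    decide ((PySem.List.pyGetD alunos i ("", 0)).2 < nota)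
      || !(verifica_matricula (PySem.List.pyGetD alunos i ("", 0)).1 inscritos))]
  rw [pvCountP_pyRange_pyGetD alunos ("", 0)
    (fun a => decide (a.2 < nota) || !(verifica_matricula a.1 inscritos))]
  have hcompl : alunos.countP (fun a => decide (a.2 < nota) || !(verifica_matricula a.1 inscritos))
      = alunos.countP (fun a => !(decide (nota ≤ a.2) && inscritos.contains a.1)) := by
    apply List.countP_congr
    intro a _
    rw [verifica_eq_contains, Bool.not_and]
    have : decide (a.2 < nota) = !decide (nota ≤ a.2) := by
      by_cases h : nota ≤ a.2 <;> simp [h] <;> omega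
    rw [this]
  have := pvCountP_not_add_filter
    (fun a : String × Int => decide (nota ≤ a.2) && inscritos.contains a.1) alunos
  rw [hcompl]
  omega
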